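-- pv_equiv track=rewrite | github.com/yaroslavvb/hinton-problems | fast-weights-rehearsal/visualize_fast_weights_rehearsal.py | _phase_boundaries
-- ===== SOURCE A (Python) =====
-- def _phase_boundaries(phases):
--     """Return list of (label, idx_start, idx_end) inclusive, in plot order."""
--     out = []
--     cur_label = phases[0]
--     cur_start = 0
--     for i, p in enumerate(phases[1:], start=1):
--         if p != cur_label:
--             out.append((cur_label, cur_start, i - 1))
--             cur_label = p
--             cur_start = i
--     out.append((cur_label, cur_start, len(phases) - 1))
--     return out
-- ===== SOURCE B (Python) =====
-- def _phase_boundaries(phases):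
--     """Return list of (label, idx_start, idx_end) inclusive, in plot order."""
--     n = len(phases)
--     starts = [0] + [i for i in range(1, n) if phases[i] != phases[i - 1]]
--     ends = [s - 1 for s in starts[1:]] + [n - 1]
--     return [(phases[s], s, e) for s, e in zip(starts, ends)]
-- ===== Notes on version B (the rewrite author's own statement) =====
-- stated objective: alternative
-- what changed: Replaces A's single interleaved state-machine pass (current label/start carried through the loop, emitting on change) by three separate shaped passes: collect boundary indices by comparing neighbours, derive run ends from the next starts, then zip and read each label by index.
import Mathlib
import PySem

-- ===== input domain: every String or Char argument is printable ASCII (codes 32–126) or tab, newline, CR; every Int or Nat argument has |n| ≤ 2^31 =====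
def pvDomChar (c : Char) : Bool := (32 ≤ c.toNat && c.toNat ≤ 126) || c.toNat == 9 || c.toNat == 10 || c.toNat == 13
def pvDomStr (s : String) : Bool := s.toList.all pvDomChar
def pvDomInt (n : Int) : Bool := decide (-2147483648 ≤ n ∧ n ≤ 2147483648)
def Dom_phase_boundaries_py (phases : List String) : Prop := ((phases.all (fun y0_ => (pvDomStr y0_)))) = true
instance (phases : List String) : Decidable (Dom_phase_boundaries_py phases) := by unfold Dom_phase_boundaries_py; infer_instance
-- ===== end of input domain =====

-- B re-decomposes A's one-pass run detector into three passes: collect boundary indices, derive run ends, zip and label; same O(n) cost (objective: alternative).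

-- ===== PORT A =====
def phase_boundaries_py (phases : List String) : List (String × Int × Int) :=
  match PySem.List.pyGet? phases 0 with
  | none => []   -- phases[0] raises IndexError on the empty list; excluded by Pre_
  | some h =>
    let res := (PySem.List.enumerate (PySem.List.slice phases (some 1) none) 1).foldl
      (fun (st : List (String × Int × Int) × String × Int) ip =>
        if ip.2 ≠ st.2.1 then (st.1 ++ [(st.2.1, st.2.2, ip.1 - 1)], ip.2, ip.1) else st)
      ([], h, 0)
    res.1 ++ [(res.2.1, res.2.2, (phases.length : Int) - 1)]

-- ===== PORT B =====
def phase_boundaries_py_alt (phases : List String) : List (String × Int × Int) :=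
  let n : Int := (phases.length : Int)
  let starts : List Int := 0 :: (PySem.List.pyRange 1 n 1).filter
      (fun i => PySem.List.pyGet? phases i ≠ PySem.List.pyGet? phases (i - 1))
  let ends : List Int := (PySem.List.slice starts (some 1) none).map (fun s => s - 1) ++ [n - 1]
  (starts.zip ends).map
    (fun se => ((PySem.List.pyGet? phases se.1).getD "", se.1, se.2))
  -- .getD "": phases[s] raises only on the empty list (excluded by Pre_); otherwise every start is in range

-- ===== PRECONDITION & SPEC =====
-- Pre_ excludes only the empty list, on which both A and B raise IndexError (phases[0]).
def Pre_phase_boundaries_py (phases : List String) : Prop := phases ≠ []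
instance (phases : List String) : Decidable (Pre_phase_boundaries_py phases) := by unfold Pre_phase_boundaries_py; infer_instance
def pvWitness_phase_boundaries_py : List String := (["a", "a", "b"])
def Spec_phase_boundaries_py (phases : List String) (out : List (String × Int × Int)) : Prop := out = phase_boundaries_py_alt phases
instance (phases : List String) (out : List (String × Int × Int)) : Decidable (Spec_phase_boundaries_py phases out) := by unfold Spec_phase_boundaries_py; infer_instance

-- ===== CLAIM (what is proved, stated in full; the proofs are below) =====
def Claim_equal_phase_boundaries_py : Prop := ∀ (phases : List String), Dom_phase_boundaries_py phases → Pre_phase_boundaries_py phases → Spec_phase_boundaries_py phases (phase_boundaries_py phases)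

-- ===== LEMMAS AND PROOFS =====

-- A's loop as a structural recursion
def runA (cl : String) (cs i : Int) : List String → List (String × Int × Int)
  | [] => [(cl, cs, i - 1)]
  | p :: rest => if p ≠ cl then (cl, cs, i - 1) :: runA p i (i + 1) rest else runA cl cs (i + 1) rest

-- shift a result triple / index pair by one position
def sh1 (p : String × Int × Int) : String × Int × Int := (p.1, p.2.1 + 1, p.2.2 + 1)
def shp (p : Int × Int) : Int × Int := (p.1 + 1, p.2 + 1)

-- B's boundary-index list and output builder, named for the proofs
def bounds (l : List String) : List Int :=
  (PySem.List.pyRange 1 (l.length : Int) 1).filter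
    (fun i => PySem.List.pyGet? l i ≠ PySem.List.pyGet? l (i - 1))

def mkOut (l : List String) (q : List (Int × Int)) : List (String × Int × Int) :=
  q.map (fun se => ((PySem.List.pyGet? l se.1).getD "", se.1, se.2))

theorem loopA_eq :
    ∀ (t : List String) (acc : List (String × Int × Int)) (cl : String) (cs s : Int),
    (let r := (PySem.List.enumerate t s).foldl
      (fun (st : List (String × Int × Int) × String × Int) ip =>
        if ip.2 ≠ st.2.1 then (st.1 ++ [(st.2.1, st.2.2, ip.1 - 1)], ip.2, ip.1) else st)
      (acc, cl, cs)
     r.1 ++ [(r.2.1, r.2.2, s + (t.length : Int) - 1)]) = acc ++ runA cl cs s t := by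
  intro t
  induction t with
  | nil => intro acc cl cs s; simp [PySem.List.enumerate_nil, runA]
  | cons p rest ih =>
    intro acc cl cs s
    simp only [PySem.List.enumerate_cons, List.foldl_cons, runA]
    by_cases hp : p = cl
    · subst hp
      simp only [ne_eq, not_true_eq_false, if_false, ite_false]
      have h := ih acc p cs (s + 1)
      simp only [List.length_cons] at h ⊢
      push_cast at h ⊢
      rw [show (s + 1 + (rest.length : Int) - 1) = s + ((rest.length : Int) + 1) - 1 by ring] at h
      simpa using h
    · simp only [ne_eq, hp, not_false_iff, if_true, ite_true]
      have h := ih (acc ++ [(cl, cs, s - 1)]) p s (s + 1)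
      simp only [List.length_cons] at h ⊢
      push_cast at h ⊢
      rw [show (s + 1 + (rest.length : Int) - 1) = s + ((rest.length : Int) + 1) - 1 by ring] at h
      simpa [List.append_assoc] using h

theorem A_eq_runA (h : String) (t : List String) :
    phase_boundaries_py (h :: t) = runA h 0 1 t := by
  have := loopA_eq t [] h 0 1
  simp only [phase_boundaries_py, PySem.List.pyGet?_zero_cons, PySem.List.slice_from_one,
    List.tail_cons, List.length_cons] at *
  push_cast at this ⊢
  rw [show ((t.length : Int) + 1 - 1) = 1 + (t.length : Int) - 1 by ring]
  simpa using this

theorem pyGet?_cons_of_nonneg {α : Type} (x : α) (l : List α) (i : Int) (hi : 0 ≤ i) :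
    PySem.List.pyGet? (x :: l) (i + 1) = PySem.List.pyGet? l i := by
  obtain ⟨n, rfl⟩ : ∃ n : Nat, i = (n : Int) := ⟨i.toNat, (Int.toNat_of_nonneg hi).symm⟩
  exact PySem.List.pyGet?_cons_succ x l n

theorem bounds_mem (l : List String) : ∀ i ∈ bounds l, 1 ≤ i := by
  intro i hi
  have := List.mem_of_mem_filter hi
  exact (PySem.List.mem_pyRange_one.mp this).1

theorem pyRange_shift (n : Int) : PySem.List.pyRange 2 (n + 1) 1 = (PySem.List.pyRange 1 n 1).map (· + 1) := by
  rw [PySem.List.pyRange_one, PySem.List.pyRange_one]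
  rw [show (n + 1 - 2) = n - 1 by ring]
  rw [List.map_map]
  exact List.map_congr_left (fun k _ => by simp; ring)

theorem bounds_cons (x y : String) (rest : List String) :
    bounds (x :: y :: rest) =
      (if y ≠ x then [1] else []) ++ (bounds (y :: rest)).map (· + 1) := by
  unfold bounds
  have hlen : (((x :: y :: rest).length : Int)) = ((y :: rest).length : Int) + 1 := by
    push_cast [List.length_cons]; ring
  rw [hlen]
  have h2 : (1 : Int) < ((y :: rest).length : Int) + 1 := by
    have h0 : 0 < (y::rest).length := by simp
    exact_mod_cast Nat.succ_lt_succ h0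
  rw [PySem.List.pyRange_one_cons h2, show (1:Int) + 1 = 2 from rfl, pyRange_shift]
  rw [List.filter_cons, List.filter_map]
  have hhead : (decide (PySem.List.pyGet? (x :: y :: rest) 1 ≠ PySem.List.pyGet? (x :: y :: rest) (1 - 1))) = decide (y ≠ x) := by
    have hn : (0:Int) ≤ (rest.length:Int) + 1 := by positivity
    simp [PySem.List.pyGet?, PySem.List.pyIdx?, hn, eq_comm]
  rw [hhead]
  have hfilter : List.filter ((fun i => decide (PySem.List.pyGet? (x :: y :: rest) i ≠ PySem.List.pyGet? (x :: y :: rest) (i - 1))) ∘ (· + 1)) (PySem.List.pyRange 1 ((y :: rest).length : Int) 1)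
      = List.filter (fun i => decide (PySem.List.pyGet? (y :: rest) i ≠ PySem.List.pyGet? (y :: rest) (i - 1))) (PySem.List.pyRange 1 ((y :: rest).length : Int) 1) := by
    apply List.filter_congr
    intro i hi
    have h1 : 1 ≤ i := (PySem.List.mem_pyRange_one.mp hi).1
    simp only [Function.comp]
    rw [pyGet?_cons_of_nonneg _ _ i (by omega),
        show i + 1 - 1 = (i - 1) + 1 by ring,
        pyGet?_cons_of_nonneg _ _ (i - 1) (by omega)]
  rw [hfilter]
  by_cases hxy : y = x <;> simp [hxy]

theorem mkOut_shift (x : String) (l : List String) (q : List (Int × Int))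
    (hq : ∀ p ∈ q, 0 ≤ p.1) :
    mkOut (x :: l) (q.map shp) = (mkOut l q).map sh1 := by
  unfold mkOut
  rw [List.map_map, List.map_map]
  apply List.map_congr_left
  intro p hp
  simp only [Function.comp, shp, sh1]
  rw [pyGet?_cons_of_nonneg _ _ p.1 (hq p hp)]

theorem runA_shift_both (t : List String) :
    ∀ (cl : String) (cs i : Int), runA cl (cs + 1) (i + 1) t = (runA cl cs i t).map sh1 := by
  induction t with
  | nil => intro cl cs i; simp [runA, sh1]
  | cons p rest ih =>
    intro cl cs i
    simp only [runA]
    by_cases hp : p = cl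
    · simp only [hp, ne_eq, not_true_eq_false, if_false]
      rw [show i + 1 + 1 = (i + 1) + 1 by ring]
      exact ih cl cs (i + 1)
    · simp only [ne_eq, hp, not_false_iff, if_true, List.map_cons]
      rw [show i + 1 + 1 = (i + 1) + 1 by ring]
      rw [ih p i (i + 1)]
      simp [sh1]

theorem runA_shift_i (t : List String) :
    ∀ (cl : String) (cs i : Int), runA cl cs (i + 1) t =
      match runA cl cs i t with
      | [] => []
      | p :: r => (p.1, p.2.1, p.2.2 + 1) :: r.map sh1 := by
  induction t with
  | nil => intro cl cs i; simp [runA]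
  | cons p rest ih =>
    intro cl cs i
    simp only [runA]
    by_cases hp : p = cl
    · simp only [hp, ne_eq, not_true_eq_false, if_false]
      rw [show i + 1 + 1 = (i + 1) + 1 by ring]
      exact ih cl cs (i + 1)
    · simp only [ne_eq, hp, not_false_iff, if_true]
      rw [show i + 1 + 1 = (i + 1) + 1 by ring, runA_shift_both]
      ring_nf

theorem B_eq_mkOut (l : List String) :
    phase_boundaries_py_alt l =
      mkOut l ((0 :: bounds l).zip ((bounds l).map (fun s => s - 1) ++ [(l.length : Int) - 1])) := by
  simp [phase_boundaries_py_alt, mkOut, bounds, PySem.List.slice_from_one]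

theorem zip_shift (a b : List Int) :
    ((a.map (· + 1)).zip (b.map (· + 1))) = (a.zip b).map shp := by
  rw [List.zip_map]
  exact List.map_congr_left (fun p _ => by obtain ⟨u, v⟩ := p; rfl)

theorem keyA (x : String) (l' : List String) (b' : List Int) (n' : Int)
    (hhead : PySem.List.pyGet? l' 0 = some x)
    (hb : ∀ i ∈ b', 1 ≤ i) :
    mkOut (x :: l') ((0 :: b'.map (· + 1)).zip (b' ++ [n'])) =
      (match mkOut l' ((0 :: b').zip (b'.map (fun s => s - 1) ++ [n' - 1])) with
       | [] => []
       | p :: r => (p.1, p.2.1, p.2.2 + 1) :: r.map sh1) := by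
  cases b' with
  | nil =>
    simp [mkOut, hhead]
  | cons b0 b'' =>
    have hQpos : ∀ p ∈ ((b0 :: b'').zip (b''.map (fun s => s - 1) ++ [n' - 1])), 0 ≤ p.1 := by
      intro p hp
      obtain ⟨a, b⟩ := p
      have h1 := (List.of_mem_zip hp).1
      have := hb a h1
      omega
    have e6 : b'' ++ [n'] = (b''.map (fun s => s - 1) ++ [n' - 1]).map (· + 1) := by
      simp [List.map_map, Function.comp_def]
    have hzipQ : ((b0 + 1) :: b''.map (· + 1)).zip (b'' ++ [n'])
        = ((b0 :: b'').zip (b''.map (fun s => s - 1) ++ [n' - 1])).map shp := by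
      rw [show ((b0 + 1) :: b''.map (· + 1)) = (b0 :: b'').map (· + 1) by simp, e6, zip_shift]
    rw [show ((b0 :: b'').map (· + 1)) = ((b0 + 1) :: b''.map (· + 1)) from List.map_cons ..]
    rw [show ((b0 :: b'') ++ [n']) = b0 :: (b'' ++ [n']) from List.cons_append ..]
    rw [List.zip_cons_cons, show mkOut (x :: l') (((0:Int), b0) :: ((b0 + 1) :: b''.map (· + 1)).zip (b'' ++ [n'])) = ((PySem.List.pyGet? (x :: l') 0).getD "", 0, b0) :: mkOut (x :: l') ((((b0 + 1) :: b''.map (· + 1)).zip (b'' ++ [n']))) from List.map_cons ..]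
    rw [hzipQ, mkOut_shift x l' _ hQpos]
    simp only [List.map_cons, List.cons_append, List.zip_cons_cons, mkOut, hhead]
    simp [mkOut]

theorem keyB (x : String) (l' : List String) (b' : List Int) (n' : Int)
    (hb : ∀ i ∈ b', 1 ≤ i) :
    mkOut (x :: l') ((0 :: 1 :: b'.map (· + 1)).zip (((1 :: b'.map (· + 1)).map (fun s => s - 1)) ++ [n'])) =
      (x, 0, 0) :: (mkOut l' ((0 :: b').zip (b'.map (fun s => s - 1) ++ [n' - 1]))).map sh1 := by
  have hq0 : ∀ p ∈ ((0 :: b').zip (b'.map (fun s => s - 1) ++ [n' - 1])), 0 ≤ p.1 := by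
    intro p hp
    obtain ⟨a, b⟩ := p
    have h1 := (List.of_mem_zip hp).1
    simp only [List.mem_cons] at h1
    rcases h1 with h1 | h1
    · omega
    · have := hb a h1; omega
  have e3 : ((1 :: b'.map (· + 1)).map (fun s => s - 1)) = 0 :: b' := by
    simp [List.map_map, Function.comp_def]
  rw [e3]
  have e2 : b' ++ [n'] = (b'.map (fun s => s - 1) ++ [n' - 1]).map (· + 1) := by
    simp [List.map_map, Function.comp_def]
  have hzip' : (1 :: b'.map (· + 1)).zip (b' ++ [n'])
      = ((0 :: b').zip (b'.map (fun s => s - 1) ++ [n' - 1])).map shp := by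
    rw [show ((1:Int) :: b'.map (· + 1)) = (0 :: b').map (· + 1) by simp, e2, zip_shift]
  rw [show ((0:Int) :: b') ++ [n'] = 0 :: (b' ++ [n']) from List.cons_append ..]
  rw [List.zip_cons_cons]
  rw [show mkOut (x :: l') (((0:Int), (0:Int)) :: (1 :: b'.map (· + 1)).zip (b' ++ [n'])) = ((PySem.List.pyGet? (x :: l') 0).getD "", 0, 0) :: mkOut (x :: l') ((1 :: b'.map (· + 1)).zip (b' ++ [n'])) from List.map_cons ..]
  rw [hzip', mkOut_shift x l' _ hq0]
  simp

theorem B_eq_runA : ∀ (xs : List String) (x : String),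
    phase_boundaries_py_alt (x :: xs) = runA x 0 1 xs := by
  intro xs
  induction xs with
  | nil =>
    intro x
    rw [B_eq_mkOut]
    simp [bounds, mkOut, runA, PySem.List.pyRange_one_eq_nil, PySem.List.pyGet?, PySem.List.pyIdx?]
  | cons y rest ih =>
    intro x
    rw [B_eq_mkOut, bounds_cons]
    have hb' : ∀ i ∈ bounds (y :: rest), 1 ≤ i := bounds_mem _
    have hlen : ((x :: y :: rest).length : Int) - 1 = ((y :: rest).length : Int) := by
      push_cast [List.length_cons]; ring
    rw [hlen]
    have hBrec : mkOut (y :: rest) ((0 :: bounds (y :: rest)).zip ((bounds (y :: rest)).map (fun s => s - 1) ++ [((y :: rest).length : Int) - 1])) = runA y 0 1 rest := by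
      rw [← B_eq_mkOut]; exact ih y
    by_cases hxy : y = x
    · subst hxy
      simp only [ne_eq, not_true_eq_false, if_false, List.nil_append]
      rw [show runA y 0 1 (y :: rest) = runA y 0 2 rest by simp [runA],
          show (2:Int) = 1 + 1 from rfl, runA_shift_i, ← hBrec]
      have e4 : ((bounds (y :: rest)).map (· + 1)).map (fun s => s - 1) = bounds (y :: rest) := by
        simp [List.map_map, Function.comp_def]
      rw [e4]
      exact keyA y (y :: rest) (bounds (y :: rest)) _ (PySem.List.pyGet?_zero_cons y rest) hb'
    · simp only [ne_eq, hxy, not_false_iff, if_true, List.singleton_append]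
      rw [keyB x (y :: rest) (bounds (y :: rest)) _ hb', hBrec]
      rw [show runA x 0 1 (y :: rest) = (x, 0, 0) :: runA y 1 2 rest by simp [runA, hxy],
          show (1:Int) = 0 + 1 from rfl, show (2:Int) = 1 + 1 from rfl, runA_shift_both]
      norm_num

-- ===== VERDICT (by name: the statement is the Claim_ definition above) =====
theorem phase_boundaries_py_spec : Claim_equal_phase_boundaries_py := by
  intro phases _ hpre
  unfold Spec_phase_boundaries_py
  cases phases with
  | nil => exact absurd rfl hpre
  | cons h t => rw [A_eq_runA, B_eq_runA]
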